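-- pv_equiv track=rewrite | github.com/samim-git/resume-tailor-ai | backend/app/resume/resume_creator_overleaf.py | _escape_latex_with_bold_markers
-- ===== SOURCE A (Python) =====
-- from typing import Optional
--
-- def _escape_latex(s: Optional[str]) -> str:
--     if not s:
--         return ""
--     replacements = {
--         "&": r"\&",
--         "%": r"\%",
--         "$": r"\$",
--         "#": r"\#",
--         "_": r"\_",
--         "{": r"\{",
--         "}": r"\}",
--         "~": r"\textasciitilde{}",
--         "^": r"\textasciicircum{}",
--     }
--     for k, v in replacements.items():
--         s = s.replace(k, v)
--     return s
--
-- def _escape_latex_with_bold_markers(s: Optional[str]) -> str: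
--     """
--     Convert \\b ... b\\ markers into \\textbf{...} while escaping other text.
--     Normalizes \\\\b and b\\\\ to \\b and b\\ so both single and double backslash work.
--     """
--     raw = (s or "").replace("\\\\b", "\\b").replace("b\\\\", "b\\")
--     OPEN = "\\b"
--     CLOSE = "b\\"
--     out: list[str] = []
--     i = 0
--     while i < len(raw):
--         open_at = raw.find(OPEN, i)
--         if open_at == -1:
--             out.append(_escape_latex(raw[i:]))
--             break
--         if open_at > i:
--             out.append(_escape_latex(raw[i:open_at]))
--         inner_start = open_at + len(OPEN)
--         close_at = raw.find(CLOSE, inner_start)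
--         if close_at == -1:
--             out.append(_escape_latex(raw[open_at:]))
--             break
--         inner = raw[inner_start:close_at]
--         out.append(r"\textbf{" + _escape_latex(inner) + "}")
--         i = close_at + len(CLOSE)
--     return "".join(out)
-- ===== SOURCE B (Python) =====
-- # B: single-pass character-level state machine (outside / inside-bold) with a
-- # per-character escape map, replacing A's find/slice index loop and its nine
-- # sequential replace passes. Alternative decomposition; not claimed faster.
--
-- _ESC = {
--     "&": r"\&", "%": r"\%", "$": r"\$", "#": r"\#", "_": r"\_",
--     "{": r"\{", "}": r"\}", "~": r"\textasciitilde{}", "^": r"\textasciicircum{}",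
-- }
--
--
-- def _esc(chars):
--     return "".join(_ESC.get(c, c) for c in chars)
--
--
-- def _escape_latex_with_bold_markers(s):
--     raw = (s or "").replace("\\\\b", "\\b").replace("b\\\\", "b\\")
--     out = []
--     buf = None  # None = outside bold; a list = raw chars collected inside \b ... b\
--     k = 0
--     n = len(raw)
--     while k < n:
--         c = raw[k]
--         nxt = raw[k + 1] if k + 1 < n else None
--         if buf is None:
--             if c == "\\" and nxt == "b":     # saw "\b": enter bold
--                 buf = []
--                 k += 2
--             else:
--                 out.append(_ESC.get(c, c))
--                 k += 1
--         else:
--             if c == "b" and nxt == "\\":     # saw "b\": close bold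
--                 out.append("\\textbf{" + _esc(buf) + "}")
--                 buf = None
--                 k += 2
--             else:
--                 buf.append(c)
--                 k += 1
--     if buf is not None:
--         out.append(_esc("\\b" + "".join(buf)))  # EOF inside: unmatched "\b" stays literal, escaped
--     return "".join(out)
-- ===== Notes on version B (the rewrite author's own statement) =====
-- stated objective: alternative
-- what changed: Replaces A's find/slice index loop (which re-scans with str.find and escapes each segment by nine sequential str.replace passes) with a single left-to-right character-level state machine (outside/inside-bold states) that escapes via one per-character map in a single pass.
import Mathlib
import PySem

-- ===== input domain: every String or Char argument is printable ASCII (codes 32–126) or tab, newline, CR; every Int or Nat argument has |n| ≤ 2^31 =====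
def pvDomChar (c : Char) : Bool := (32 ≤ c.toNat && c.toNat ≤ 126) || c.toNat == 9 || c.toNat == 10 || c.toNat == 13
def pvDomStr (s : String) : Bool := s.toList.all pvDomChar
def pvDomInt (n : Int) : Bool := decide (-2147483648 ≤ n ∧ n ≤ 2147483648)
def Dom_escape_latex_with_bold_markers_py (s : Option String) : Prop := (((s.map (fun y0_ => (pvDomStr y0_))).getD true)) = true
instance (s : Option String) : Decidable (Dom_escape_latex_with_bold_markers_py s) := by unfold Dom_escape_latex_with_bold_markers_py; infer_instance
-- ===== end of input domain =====

-- B replaces A's find/slice index loop and its nine sequential replace passes by a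
-- single-pass character-level state machine with a per-character escape map (alternative
-- decomposition; not claimed faster).

-- ===== PORT A =====
-- String operations are ported on List Char via PySem.Chars (exact; see PYSEM.md).

-- _escape_latex: the nine sequential str.replace passes, in the dict's insertion order;
-- 'if not s: return ""' is the [] guard (the loop only passes it slices of a str).
def escListA (l : List Char) : List Char :=
  if l = [] then [] else
    let s1 := PySem.Chars.replace l  ['&'] ['\\', '&']
    let s2 := PySem.Chars.replace s1 ['%'] ['\\', '%']
    let s3 := PySem.Chars.replace s2 ['$'] ['\\', '$']
    let s4 := PySem.Chars.replace s3 ['#'] ['\\', '#']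
    let s5 := PySem.Chars.replace s4 ['_'] ['\\', '_']
    let s6 := PySem.Chars.replace s5 ['{'] ['\\', '{']
    let s7 := PySem.Chars.replace s6 ['}'] ['\\', '}']
    let s8 := PySem.Chars.replace s7 ['~'] "\\textasciitilde{}".toList
    let s9 := PySem.Chars.replace s8 ['^'] "\\textasciicircum{}".toList
    s9

def openMarker : List Char := ['\\', 'b']      -- OPEN = "\b"
def closeMarker : List Char := ['b', '\\']     -- CLOSE = "b\"

-- the while loop of _escape_latex_with_bold_markers; the index i is carried as the
-- suffix rest = raw[i:], so raw.find(OPEN, i) is the relative find on the suffix and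
-- raw.find(CLOSE, inner_start) is findFrom with the relative start open_at + 2;
-- structural fuel (= the length of the list, one unit per loop iteration) guards totality.
def loopA : Nat → List Char → List Char
  | 0, _ => []                                                     -- fuel only guards totality; fuel = len(raw) suffices
  | fuel + 1, rest =>
    if rest = [] then []                                           -- while i < len(raw)
    else if PySem.Chars.find rest openMarker = -1 then
      escListA rest                                                -- out.append(esc(raw[i:])); break
    else if PySem.Chars.findFrom rest closeMarker (PySem.Chars.find rest openMarker + 2) none = -1 then
      (if 0 < PySem.Chars.find rest openMarker then               -- if open_at > i: append esc(raw[i:open_at])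
          escListA (PySem.List.slice rest (some 0) (some (PySem.Chars.find rest openMarker))) else [])
        ++ escListA (PySem.List.slice rest (some (PySem.Chars.find rest openMarker)) none)  -- esc(raw[open_at:]); break
    else
      (if 0 < PySem.Chars.find rest openMarker then
          escListA (PySem.List.slice rest (some 0) (some (PySem.Chars.find rest openMarker))) else [])
        ++ "\\textbf{".toList
        ++ escListA (PySem.List.slice rest (some (PySem.Chars.find rest openMarker + 2))
             (some (PySem.Chars.findFrom rest closeMarker (PySem.Chars.find rest openMarker + 2) none)))
        ++ ['}']
        ++ loopA fuel (PySem.List.slice rest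
             (some (PySem.Chars.findFrom rest closeMarker (PySem.Chars.find rest openMarker + 2) none + 2))
             none)                                                 -- i = close_at + len(CLOSE)

def escape_latex_with_bold_markers_py (s : Option String) : String :=
  let raw := PySem.Str.replace (PySem.Str.replace (match s with | none => "" | some t => t)
               "\\\\b" "\\b") "b\\\\" "b\\"
  String.ofList (loopA raw.toList.length raw.toList)

-- ===== PORT B =====
-- per-character escape map _ESC.get(c, c)
def escChar (c : Char) : List Char :=
  if c = '&' then ['\\', '&'] else if c = '%' then ['\\', '%']
  else if c = '$' then ['\\', '$'] else if c = '#' then ['\\', '#']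
  else if c = '_' then ['\\', '_'] else if c = '{' then ['\\', '{']
  else if c = '}' then ['\\', '}'] else if c = '~' then "\\textasciitilde{}".toList
  else if c = '^' then "\\textasciicircum{}".toList else [c]

-- _esc: join of the per-character map
def escFlat (l : List Char) : List Char := l.flatMap escChar

-- termination facts for the state machine, cited in decreasing_by
lemma pv_tail_lt (c : Char) (rest : List Char) : rest.tail.length < (c :: rest).length := by
  have h : rest.tail.length = rest.length - 1 := List.length_tail
  exact Nat.lt_succ_of_le (h ▸ Nat.sub_le rest.length 1)
lemma pv_cons_lt (c : Char) (rest : List Char) : rest.length < (c :: rest).length :=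
  Nat.lt_succ_self rest.length

-- the state machine: goB = loop with buf is None (outside), goInB = loop with buf (inside)
mutual
def goB : List Char → List Char
  | [] => []
  | c :: rest =>
    if c = '\\' ∧ rest.head? = some 'b' then goInB rest.tail []   -- saw "\b": enter bold
    else escChar c ++ goB rest
  termination_by l => l.length
  decreasing_by
  · exact pv_tail_lt c rest
  · exact pv_cons_lt c rest
def goInB : List Char → List Char → List Char
  | [], buf => escFlat ('\\' :: 'b' :: buf)                        -- EOF inside: esc("\b" + buf)
  | c :: rest, buf =>
    if c = 'b' ∧ rest.head? = some '\\' then                       -- saw "b\": close bold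
      "\\textbf{".toList ++ escFlat buf ++ ['}'] ++ goB rest.tail
    else goInB rest (buf ++ [c])
  termination_by l _ => l.length
  decreasing_by
  · exact pv_tail_lt c rest
  · exact pv_cons_lt c rest
end

def escape_latex_with_bold_markers_py_alt (s : Option String) : String :=
  let raw := PySem.Str.replace (PySem.Str.replace (match s with | none => "" | some t => t)
               "\\\\b" "\\b") "b\\\\" "b\\"
  String.ofList (goB raw.toList)

-- ===== PRECONDITION & SPEC =====
def Spec_escape_latex_with_bold_markers_py (s : Option String) (out : String) : Prop := out = escape_latex_with_bold_markers_py_alt s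
instance (s : Option String) (out : String) : Decidable (Spec_escape_latex_with_bold_markers_py s out) := by unfold Spec_escape_latex_with_bold_markers_py; infer_instance

-- ===== CLAIM (what is proved, stated in full; the proofs are below) =====
def Claim_equal_escape_latex_with_bold_markers_py : Prop := ∀ (s : Option String), Dom_escape_latex_with_bold_markers_py s → Spec_escape_latex_with_bold_markers_py s (escape_latex_with_bold_markers_py s)

-- ===== LEMMAS AND PROOFS =====

-- a single-character str.replace is a flatMap
lemma replace_go_single (c : Char) (t : List Char) :
    ∀ (fuel : Nat) (l acc : List Char), l.length ≤ fuel →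
      PySem.Chars.replace.go [c] t fuel l acc
        = acc.reverse ++ l.flatMap (fun x => if x = c then t else [x]) := by
  intro fuel
  induction fuel with
  | zero =>
    intro l acc hl
    have : l = [] := List.eq_nil_of_length_eq_zero (Nat.le_zero.mp hl)
    subst this; simp [PySem.Chars.replace.go]
  | succ f ih =>
    intro l acc hl
    cases l with
    | nil => simp [PySem.Chars.replace.go]
    | cons x xs =>
      by_cases hx : x = c
      · subst hx
        have hpref : [x].isPrefixOf (x :: xs) = true := by simp [List.isPrefixOf]
        simp only [PySem.Chars.replace.go, hpref, if_true]
        rw [ih _ _ (by simpa using Nat.le_of_succ_le_succ hl)]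
        simp
      · have hpref : [c].isPrefixOf (x :: xs) = false := by
          simp [List.isPrefixOf]; intro h; exact absurd h.symm hx
        simp only [PySem.Chars.replace.go, hpref]
        rw [ih _ _ (Nat.le_of_succ_le_succ hl)]
        simp [hx]

lemma replace_single (l : List Char) (c : Char) (t : List Char) :
    PySem.Chars.replace l [c] t = l.flatMap (fun x => if x = c then t else [x]) := by
  simp [PySem.Chars.replace]
  rw [replace_go_single c t l.length l [] (le_refl _)]
  simp

lemma escListA_eq (l : List Char) : escListA l = escFlat l := by
  by_cases h : l = []
  · subst h; simp [escListA, escFlat]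
  · simp only [escListA, h, if_false, escFlat]
    simp only [replace_single, List.flatMap_assoc]
    refine List.flatMap_congr ?_
    intro c _
    by_cases h1 : c = '&'; · subst h1; decide
    by_cases h2 : c = '%'; · subst h2; decide
    by_cases h3 : c = '$'; · subst h3; decide
    by_cases h4 : c = '#'; · subst h4; decide
    by_cases h5 : c = '_'; · subst h5; decide
    by_cases h6 : c = '{'; · subst h6; decide
    by_cases h7 : c = '}'; · subst h7; decide
    by_cases h8 : c = '~'; · subst h8; decide
    by_cases h9 : c = '^'; · subst h9; decide
    simp [escChar, h1, h2, h3, h4, h5, h6, h7, h8, h9]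

lemma prefix_pair (u v c : Char) (r : List Char) :
    [u, v] <+: (c :: r) ↔ c = u ∧ r.head? = some v := by
  constructor
  · rintro ⟨t, ht⟩
    cases ht
    exact ⟨rfl, rfl⟩
  · rintro ⟨rfl, h⟩
    cases r with
    | nil => simp at h
    | cons a t => cases h; exact ⟨t, rfl⟩

lemma goB_noOpen (l : List Char) (h : ¬ openMarker <:+: l) : goB l = escFlat l := by
  induction l with
  | nil => simp [goB, escFlat]
  | cons c rest ih =>
    have h0 : ¬ (c = '\\' ∧ rest.head? = some 'b') := by
      intro hc
      exact h (((prefix_pair '\\' 'b' c rest).mpr hc).isInfix)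
    rw [goB, if_neg h0, ih (fun hi => h (List.infix_cons hi))]
    simp [escFlat]

lemma goB_split (p m : List Char)
    (h : ∀ i < p.length, ¬ openMarker <+: (p ++ '\\' :: 'b' :: m).drop i) :
    goB (p ++ '\\' :: 'b' :: m) = escFlat p ++ goInB m [] := by
  induction p with
  | nil => simp [goB, escFlat]
  | cons a p ih =>
    have h0 : ¬ (a = '\\' ∧ (p ++ '\\' :: 'b' :: m).head? = some 'b') := by
      intro hc
      exact h 0 (by simp) (by simpa [openMarker] using (prefix_pair '\\' 'b' a _).mpr hc)
    rw [List.cons_append, goB, if_neg h0, ih (fun i hi => h (i + 1) (by simpa using Nat.succ_lt_succ hi))]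
    simp [escFlat]

lemma goInB_noClose (m : List Char) (h : ¬ closeMarker <:+: m) :
    ∀ buf, goInB m buf = escFlat ('\\' :: 'b' :: (buf ++ m)) := by
  induction m with
  | nil => intro buf; simp [goInB]
  | cons c rest ih =>
    intro buf
    have h0 : ¬ (c = 'b' ∧ rest.head? = some '\\') := by
      intro hc
      exact h (((prefix_pair 'b' '\\' c rest).mpr hc).isInfix)
    rw [goInB, if_neg h0, ih (fun hi => h (List.infix_cons hi))]
    simp

lemma goInB_split (p m : List Char)
    (h : ∀ i < p.length, ¬ closeMarker <+: (p ++ 'b' :: '\\' :: m).drop i) :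
    ∀ buf, goInB (p ++ 'b' :: '\\' :: m) buf
      = "\\textbf{".toList ++ escFlat (buf ++ p) ++ ['}'] ++ goB m := by
  induction p with
  | nil => intro buf; simp [goInB]
  | cons a p ih =>
    intro buf
    have h0 : ¬ (a = 'b' ∧ (p ++ 'b' :: '\\' :: m).head? = some '\\') := by
      intro hc
      exact h 0 (by simp) (by simpa [closeMarker] using (prefix_pair 'b' '\\' a _).mpr hc)
    rw [List.cons_append, goInB, if_neg h0, ih (fun i hi => h (i + 1) (by simpa using Nat.succ_lt_succ hi))]
    simp

-- decompose a list at the first occurrence of a 2-character pattern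
lemma decomp_at (l : List Char) (u v : Char) (k : Nat) (h : [u, v] <+: l.drop k)
    (_hk : k + 2 ≤ l.length) :
    l = l.take k ++ u :: v :: l.drop (k + 2) := by
  obtain ⟨t, ht⟩ := h
  have hd : l.drop (k + 2) = t := by
    have : (l.drop k).drop 2 = t := by rw [← ht]; simp
    simpa [List.drop_drop, Nat.add_comm] using this
  conv_lhs => rw [← List.take_append_drop k l]
  rw [← ht, hd]
  simp


lemma loopA_eq_goB : ∀ (fuel : Nat) (l : List Char), l.length ≤ fuel → loopA fuel l = goB l := by
  intro fuel
  induction fuel with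
  | zero =>
    intro l hl
    have hnil : l = [] := List.eq_nil_of_length_eq_zero (Nat.le_zero.mp hl)
    subst hnil
    simp [loopA, goB]
  | succ n ih =>
    intro l hl
    by_cases hN : l = []
    · subst hN; simp [loopA, goB]
    rw [loopA, if_neg hN]
    by_cases hO : PySem.Chars.find l openMarker = -1
    · rw [if_pos hO, escListA_eq, goB_noOpen l ((PySem.Chars.find_eq_neg_one_iff _ _).mp hO)]
    rw [if_neg hO]
    -- the first "\b" is at index k
    have hinf : openMarker <:+: l := (PySem.Chars.find_ne_neg_one_iff l openMarker).mp hO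
    have hnn : 0 ≤ PySem.Chars.find l openMarker :=
      (PySem.Chars.find_nonneg_iff l openMarker).mpr hinf
    set k : Nat := (PySem.Chars.find l openMarker).toNat with hkdef
    have hk : PySem.Chars.find l openMarker = (k : Int) := (Int.toNat_of_nonneg hnn).symm
    have hpre : openMarker <+: l.drop k := (PySem.Chars.find_spec hnn).1
    have hmin : ∀ i < k, ¬ openMarker <+: l.drop i := by
      intro i hi
      exact (PySem.Chars.find_spec hnn).2 i hi
    have hlen2 : 2 ≤ (l.drop k).length := by
      have := hpre.length_le; simpa [openMarker] using this
    have hkle : k + 2 ≤ l.length := by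
      have := List.length_drop (l := l) (i := k); omega
    have hcast : PySem.Chars.find l openMarker + 2 = ((k + 2 : Nat) : Int) := by
      rw [hk]; push_cast; ring
    have heq : l = l.take k ++ '\\' :: 'b' :: l.drop (k + 2) :=
      decomp_at l '\\' 'b' k (by simpa [openMarker] using hpre) hkle
    have htklen : (l.take k).length = k := by
      rw [List.length_take]; omega
    -- B's machine crosses the literal prefix, then enters bold mode
    have hgb : goB l = escFlat (l.take k) ++ goInB (l.drop (k + 2)) [] := by
      have hsplit : ∀ i < (l.take k).length,
          ¬ openMarker <+: ((l.take k) ++ '\\' :: 'b' :: l.drop (k + 2)).drop i := by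
        intro i hi
        rw [← heq]
        exact hmin i (by omega)
      calc goB l = goB ((l.take k) ++ '\\' :: 'b' :: l.drop (k + 2)) := by rw [← heq]
        _ = escFlat (l.take k) ++ goInB (l.drop (k + 2)) [] := goB_split _ _ hsplit
    -- the escaped prefix before the marker (including the open_at = i case)
    have hpre_eq : (if 0 < PySem.Chars.find l openMarker then
        escListA (PySem.List.slice l (some 0) (some (PySem.Chars.find l openMarker))) else [])
        = escFlat (l.take k) := by
      rw [hk]
      by_cases hk0 : 0 < k
      · rw [if_pos (by exact_mod_cast hk0), PySem.List.slice_zero_start,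
          PySem.List.slice_to_natCast, escListA_eq]
      · have hz : k = 0 := by omega
        rw [if_neg (by simp [hz]), hz]
        simp [escFlat]
    rw [hcast, PySem.Chars.findFrom_natCast l closeMarker (k + 2) hkle]
    by_cases hj : PySem.Chars.find (l.drop (k + 2)) closeMarker = -1
    · -- no closing marker: A escapes the whole tail, B flushes the buffer at EOF
      rw [if_pos hj, if_pos rfl, hpre_eq, hk, PySem.List.slice_from_natCast, escListA_eq, hgb,
        goInB_noClose _ ((PySem.Chars.find_eq_neg_one_iff _ _).mp hj) []]
      have hdk : l.drop k = '\\' :: 'b' :: l.drop (k + 2) := by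
        conv_lhs => rw [heq]
        rw [List.drop_append_of_le_length (by omega)]
        simp
      rw [hdk]
      simp
    · -- closing marker at relative index j inside the tail
      have hjnn : 0 ≤ PySem.Chars.find (l.drop (k + 2)) closeMarker :=
        (PySem.Chars.find_nonneg_iff _ _).mpr ((PySem.Chars.find_ne_neg_one_iff _ _).mp hj)
      rw [if_neg hj, if_neg (by omega)]
      set m : List Char := l.drop (k + 2) with hmdef
      set j : Nat := (PySem.Chars.find m closeMarker).toNat with hjdef
      have hjc : PySem.Chars.find m closeMarker = (j : Int) := (Int.toNat_of_nonneg hjnn).symm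
      have hjpre : closeMarker <+: m.drop j := (PySem.Chars.find_spec hjnn).1
      have hjmin : ∀ i < j, ¬ closeMarker <+: m.drop i := by
        intro i hi
        exact (PySem.Chars.find_spec hjnn).2 i hi
      have hjlen2 : 2 ≤ (m.drop j).length := by
        have := hjpre.length_le; simpa [closeMarker] using this
      have hjle : j + 2 ≤ m.length := by
        have := List.length_drop (l := m) (i := j); omega
      have hmeq : m = m.take j ++ 'b' :: '\\' :: m.drop (j + 2) :=
        decomp_at m 'b' '\\' j (by simpa [closeMarker] using hjpre) hjle
      have htkj : (m.take j).length = j := by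
        rw [List.length_take]; omega
      -- B: cross the inner text, close the bold span
      have hgi : goInB m [] = "\\textbf{".toList ++ escFlat (m.take j) ++ ['}']
          ++ goB (m.drop (j + 2)) := by
        have hsplit : ∀ i < (m.take j).length,
            ¬ closeMarker <+: ((m.take j) ++ 'b' :: '\\' :: m.drop (j + 2)).drop i := by
          intro i hi
          rw [← hmeq]
          exact hjmin i (by omega)
        calc goInB m [] = goInB ((m.take j) ++ 'b' :: '\\' :: m.drop (j + 2)) [] := by rw [← hmeq]
          _ = _ := by rw [goInB_split _ _ hsplit []]; simp
      -- A's slices, in terms of m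
      have hinner : PySem.List.slice l (some ((k + 2 : Nat) : Int))
          (some (((k + 2 : Nat) : Int) + PySem.Chars.find m closeMarker)) = m.take j := by
        rw [hjc]
        have : ((k + 2 : Nat) : Int) + (j : Int) = ((k + 2 + j : Nat) : Int) := by push_cast; ring
        rw [this, PySem.List.slice_natCast, hmdef]
        congr 1
        omega
      have htail : PySem.List.slice l
          (some (((k + 2 : Nat) : Int) + PySem.Chars.find m closeMarker + 2)) none
          = m.drop (j + 2) := by
        rw [hjc]
        have : ((k + 2 : Nat) : Int) + (j : Int) + 2 = ((k + 2 + j + 2 : Nat) : Int) := by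
          push_cast; ring
        rw [this, PySem.List.slice_from_natCast, hmdef, List.drop_drop]
        congr 1
      have hlrec : (m.drop (j + 2)).length ≤ n := by
        have h1 := List.length_drop (l := m) (i := j + 2)
        have h2 : m.length = l.length - (k + 2) := by
          rw [hmdef, List.length_drop]
        omega
      rw [hpre_eq, hinner, htail, escListA_eq, ih _ hlrec, hgb, hgi]
      simp [List.append_assoc]

lemma loopA_eq_goB' (l : List Char) : loopA l.length l = goB l := loopA_eq_goB l.length l le_rfl

-- ===== VERDICT (by name: the statement is the Claim_ definition above) =====
theorem escape_latex_with_bold_markers_py_spec : Claim_equal_escape_latex_with_bold_markers_py := by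
  intro s _
  unfold Spec_escape_latex_with_bold_markers_py
  unfold escape_latex_with_bold_markers_py escape_latex_with_bold_markers_py_alt
  exact congrArg String.ofList (loopA_eq_goB' _)
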